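-- pv_equiv track=rewrite | github.com/ianlai/Algorithm-Python | algo/String/__0767__Reorganize String.py | getTwoMax
-- ===== SOURCE A (Python) =====
-- def getTwoMax(m):
--     max1 = 0
--     c1 = None
--     max2 = 0
--     c2 = None
--     for key in m.keys():
--         if m[key] > max1:
--             max1 = m[key]
--             c1 = key
--
--     for key in m.keys():
--         if key == c1:
--             continue
--         if m[key] > max2:
--             max2 = m[key]
--             c2 = key
--     return c1, c2
-- ===== SOURCE B (Python) =====
-- def getTwoMax(m):
--     max1, c1 = 0, None
--     max2, c2 = 0, None
--     for key, v in m.items():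
--         if v > max1:
--             max2, c2 = max1, c1
--             max1, c1 = v, key
--         elif v > max2:
--             max2, c2 = v, key
--     return c1, c2
-- ===== Notes on version B (the rewrite author's own statement) =====
-- stated objective: simpler
-- what changed: Replaces A's two passes over the dict (find the max, then rescan skipping its key for the runner-up) with a single pass that maintains (max1,c1) and (max2,c2) together, demoting the leader when it is beaten.
import Mathlib
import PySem

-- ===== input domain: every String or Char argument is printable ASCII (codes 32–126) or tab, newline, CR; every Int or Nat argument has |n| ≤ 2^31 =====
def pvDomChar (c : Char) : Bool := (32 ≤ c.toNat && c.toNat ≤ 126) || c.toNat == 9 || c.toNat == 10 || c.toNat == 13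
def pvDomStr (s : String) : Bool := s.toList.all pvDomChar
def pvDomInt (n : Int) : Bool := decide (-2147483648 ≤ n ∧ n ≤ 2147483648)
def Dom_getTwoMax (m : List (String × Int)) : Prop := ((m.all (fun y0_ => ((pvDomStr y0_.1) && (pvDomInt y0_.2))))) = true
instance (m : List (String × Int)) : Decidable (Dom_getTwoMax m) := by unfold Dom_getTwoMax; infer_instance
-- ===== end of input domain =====

-- B replaces A's two passes over the dict with a single pass maintaining the top two (value, key) pairs; objective: simpler.


-- ===== PORT A =====
-- for key in m.keys(): if m[key] > max1: …   then a second pass skipping key == c1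
def getTwoMax (m : List (String × Int)) : Option String × Option String :=
  let d := PySem.Dict.mk m
  let s1 := (PySem.Dict.keys d).foldl
    (fun (s : Int × Option String) key =>
      if d.getD key 0 > s.1 then (d.getD key 0, some key) else s) (0, none)
  let c1 := s1.2
  let s2 := (PySem.Dict.keys d).foldl
    (fun (s : Int × Option String) key =>
      if some key == c1 then s
      else if d.getD key 0 > s.1 then (d.getD key 0, some key) else s) (0, none)
  (c1, s2.2)

-- ===== PORT B =====
-- one pass: state ((max1, c1), (max2, c2)); demote the leader when beaten
def getTwoMax_alt (m : List (String × Int)) : Option String × Option String :=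
  let s := m.foldl
    (fun (st : (Int × Option String) × (Int × Option String)) p =>
      if p.2 > st.1.1 then ((p.2, some p.1), st.1)
      else if p.2 > st.2.1 then (st.1, (p.2, some p.1)) else st)
    ((0, none), (0, none))
  (s.1.2, s.2.2)

-- ===== PRECONDITION & SPEC =====
-- m stands for a Python dict, whose keys are necessarily distinct; lists with duplicate
-- keys correspond to no dict input of A, so they are excluded (A's domain is exactly this).
def Pre_getTwoMax (m : List (String × Int)) : Prop := (m.map Prod.fst).Nodup
instance (m : List (String × Int)) : Decidable (Pre_getTwoMax m) := by unfold Pre_getTwoMax; infer_instance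
def pvWitness_getTwoMax : (List (String × Int)) := [("a", 3), ("b", 7), ("c", 7)]
def Spec_getTwoMax (m : List (String × Int)) (out : Option String × Option String) : Prop := out = getTwoMax_alt m
instance (m : List (String × Int)) (out : Option String × Option String) : Decidable (Spec_getTwoMax m out) := by unfold Spec_getTwoMax; infer_instance

-- ===== CLAIM (what is proved, stated in full; the proofs are below) =====
def Claim_equal_getTwoMax : Prop := ∀ (m : List (String × Int)), Dom_getTwoMax m → Pre_getTwoMax m → Spec_getTwoMax m (getTwoMax m)

-- ===== LEMMAS AND PROOFS =====

-- A's pass-1 step, on the pair list directly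
def stepA1 (s : Int × Option String) (p : String × Int) : Int × Option String :=
  if p.2 > s.1 then (p.2, some p.1) else s

-- A's pass-2 step, on the pair list directly, for a fixed c1
def stepA2 (c1 : Option String) (s : Int × Option String) (p : String × Int) : Int × Option String :=
  if some p.1 == c1 then s else stepA1 s p

-- B's step
def stepB (st : (Int × Option String) × (Int × Option String)) (p : String × Int) :
    (Int × Option String) × (Int × Option String) :=
  if p.2 > st.1.1 then ((p.2, some p.1), st.1)
  else if p.2 > st.2.1 then (st.1, (p.2, some p.1)) else st

-- assoc lookup through Dict.mk under Nodup keys returns the pair's own value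
theorem getD_mk_of_mem (m : List (String × Int)) (k : String) (v : Int)
    (hnd : (m.map Prod.fst).Nodup) (hmem : (k, v) ∈ m) :
    (PySem.Dict.mk m).getD k 0 = v := by
  exact PySem.Dict.getD_of_mem_items ⟨m⟩ hmem
    (by simpa [PySem.Dict.keys_mk] using hnd) 0

-- A's two folds over keys with dict lookup equal the corresponding folds over pairs
theorem foldA_pairs (m : List (String × Int))
    (f : (Int × Option String) → String × Int → Int × Option String)
    (g : (Int × Option String) → String → Int × Option String)
    (hfg : ∀ s p, p ∈ m → g s p.1 = f s p) (a : Int × Option String) :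
    (m.map Prod.fst).foldl g a = m.foldl f a := by
  rw [List.foldl_map]
  exact PySem.List.foldl_congr_mem m _ _ a (fun acc x hx => hfg acc x hx)

-- if c1 is none or its key is absent from l, the skip branch never fires
theorem foldA2_eq_foldA1 (l : List (String × Int)) (c1 : Option String)
    (h : ∀ p ∈ l, (some p.1 == c1) = false) (a : Int × Option String) :
    l.foldl (stepA2 c1) a = l.foldl stepA1 a := by
  refine PySem.List.foldl_congr_mem l _ _ a (fun acc x hx => ?_)
  simp [stepA2, h x hx]

-- the champion returned by pass 1 is the initial one or a key of the list
theorem foldA1_snd_mem (l : List (String × Int)) (a : Int) (c : Option String) :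
    (l.foldl stepA1 (a, c)).2 = c ∨ ∃ k ∈ l.map Prod.fst, (l.foldl stepA1 (a, c)).2 = some k := by
  induction l generalizing a c with
  | nil => exact Or.inl rfl
  | cons p t ih =>
    simp only [List.foldl_cons, stepA1]
    split
    · rcases ih p.2 (some p.1) with h | ⟨k, hk, hh⟩
      · exact Or.inr ⟨p.1, by simp, h⟩
      · exact Or.inr ⟨k, by simp [hk], hh⟩
    · rcases ih a c with h | ⟨k, hk, hh⟩
      · exact Or.inl h
      · exact Or.inr ⟨k, by simp [hk], hh⟩

-- key invariant: B's single fold computes pass 1 and pass 2 (relative to pass 1's champion)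
theorem foldB_eq (m : List (String × Int)) (hnd : (m.map Prod.fst).Nodup) :
    m.foldl stepB ((0, none), (0, none)) =
      (m.foldl stepA1 (0, none),
       m.foldl (stepA2 (m.foldl stepA1 (0, none)).2) (0, none)) := by
  induction m using List.reverseRecOn with
  | nil => rfl
  | append_singleton t p ih =>
    have hall : (t.map Prod.fst ++ [p.1]).Nodup := by simpa using hnd
    have hnd' : (t.map Prod.fst).Nodup := (List.nodup_append.mp hall).1
    have hfresh : p.1 ∉ t.map Prod.fst := by
      have h2 : (p.1 :: t.map Prod.fst).Nodup := by
        simpa using List.nodup_append_comm.mp hall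
      exact (List.nodup_cons.mp h2).1
    have hskip : ∀ q ∈ t, (some q.1 == some p.1) = false := by
      intro q hq
      have : q.1 ∈ t.map Prod.fst := List.mem_map_of_mem hq
      simp only [beq_eq_false_iff_ne, ne_eq, Option.some.injEq]
      intro h; exact hfresh (h ▸ this)
    set M := t.foldl stepA1 (0, none) with hM
    have hcmem := foldA1_snd_mem t 0 none
    rw [← hM] at hcmem
    have hskipM : (some p.1 == M.2) = false := by
      rcases hcmem with h | ⟨k, hk, hh⟩
      · rw [h]; rfl
      · rw [hh]
        simp only [beq_eq_false_iff_ne, ne_eq, Option.some.injEq]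
        intro h; exact hfresh (h ▸ hk)
    rw [List.foldl_append, List.foldl_append, List.foldl_append, ih hnd', ← hM]
    simp only [List.foldl_cons, List.foldl_nil]
    by_cases hgt : p.2 > M.1
    · -- new champion: pass 2 over t++[p] w.r.t. some p.1 collapses to pass 1 over t
      have h2 : t.foldl (stepA2 (some p.1)) (0, none) = M :=
        (foldA2_eq_foldA1 t (some p.1) hskip (0, none)).trans hM.symm
      simp [stepB, stepA1, stepA2, hgt, h2]
    · -- champion unchanged: pass 2 gains one ordinary step
      have h1 : stepA1 M p = M := by simp [stepA1, hgt]
      rw [h1]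
      simp only [stepB, stepA2, stepA1, hskipM, Bool.false_eq_true, if_false]
      rw [if_neg hgt]
      split <;> rfl

-- ===== VERDICT (by name: the statement is the Claim_ definition above) =====
theorem getTwoMax_spec : Claim_equal_getTwoMax := by
  intro m _ hpre
  unfold Spec_getTwoMax getTwoMax
  have hkeys : (PySem.Dict.keys (PySem.Dict.mk m)) = m.map Prod.fst := by
    simp [PySem.Dict.keys]
  have hlook : ∀ (s : Int × Option String) (p : String × Int), p ∈ m →
      (PySem.Dict.mk m).getD p.1 0 = p.2 := by
    intro s p hp
    exact getD_mk_of_mem m p.1 p.2 hpre hp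
  have h1 : (PySem.Dict.keys (PySem.Dict.mk m)).foldl
      (fun (s : Int × Option String) key =>
        if (PySem.Dict.mk m).getD key 0 > s.1 then ((PySem.Dict.mk m).getD key 0, some key) else s)
      (0, none) = m.foldl stepA1 (0, none) := by
    rw [hkeys]
    exact foldA_pairs m stepA1 _
      (fun s p hp => by simp [stepA1, hlook s p hp]) _
  set c1 := (m.foldl stepA1 ((0 : Int), (none : Option String))).2 with hc1
  have h2 : ∀ c : Option String, (PySem.Dict.keys (PySem.Dict.mk m)).foldl
      (fun (s : Int × Option String) key =>
        if some key == c then s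
        else if (PySem.Dict.mk m).getD key 0 > s.1 then ((PySem.Dict.mk m).getD key 0, some key) else s)
      (0, none) = m.foldl (stepA2 c) (0, none) := by
    intro c
    rw [hkeys]
    exact foldA_pairs m (stepA2 c) _
      (fun s p hp => by simp [stepA2, stepA1, hlook s p hp]) _
    -- note: the skip branch returns s in both
  have hBalt : getTwoMax_alt m =
      ((m.foldl stepB ((0, none), (0, none))).1.2,
       (m.foldl stepB ((0, none), (0, none))).2.2) := rfl
  simp only [h1, h2, hBalt]
  rw [foldB_eq m hpre]
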